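-- pv_equiv track=rewrite | github.com/hjun-park/kothe | [2023-06]/[1주차]/hwan/[2023-06-04] programmers_이차월 배열 대각선 순회하기.py | solution
-- ===== SOURCE A (Python) =====
-- def solution(board, k):
--     answer = 0
--     lst = []
--     for i in range(len(board)):
--         for j in range(len(board[i])):
--             if i + j <= k:
--                 lst.append(board[i][j])
--     answer = sum(lst)
--     return answer
-- ===== SOURCE B (Python) =====
-- def solution(board, k):
--     # For row i, the cells with i + j <= k are exactly the prefix row[:k-i+1].
--     return sum(sum(row[:max(0, k - i + 1)]) for i, row in enumerate(board))
-- ===== Notes on version B (the rewrite author's own statement) =====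
-- stated objective: simpler
-- what changed: Replaces the nested per-cell index loops and the intermediate appended list by one pass that slice-sums the prefix row[:k-i+1] of each row, with no per-cell comparison.
import Mathlib
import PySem

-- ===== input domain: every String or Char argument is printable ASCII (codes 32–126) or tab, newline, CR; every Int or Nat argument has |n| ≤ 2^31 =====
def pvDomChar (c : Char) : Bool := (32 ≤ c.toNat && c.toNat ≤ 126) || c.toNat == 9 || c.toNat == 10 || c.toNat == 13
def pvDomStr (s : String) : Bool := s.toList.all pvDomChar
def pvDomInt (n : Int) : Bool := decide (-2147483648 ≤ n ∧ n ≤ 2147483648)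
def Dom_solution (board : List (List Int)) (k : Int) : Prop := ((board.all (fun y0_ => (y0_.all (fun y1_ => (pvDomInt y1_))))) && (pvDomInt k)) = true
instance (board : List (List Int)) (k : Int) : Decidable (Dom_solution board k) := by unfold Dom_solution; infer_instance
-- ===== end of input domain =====

-- B replaces the nested per-cell loops (which append each qualifying cell to a list and
-- sum it at the end) by one pass that slice-sums the prefix row[:k-i+1] of each row.

-- ===== PORT A =====
def solution (board : List (List Int)) (k : Int) : Int :=
  let lst : List Int :=
    (PySem.List.pyRange 0 (board.length : Int) 1).foldl
      (fun lst i =>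
        (PySem.List.pyRange 0 ((PySem.List.pyGetD board i []).length : Int) 1).foldl
          (fun lst j =>
            if i + j ≤ k then lst ++ [PySem.List.pyGetD (PySem.List.pyGetD board i []) j 0]
            else lst)
          lst)
      []
  lst.sum

-- ===== PORT B =====
def solution_alt (board : List (List Int)) (k : Int) : Int :=
  ((PySem.List.enumerate board 0).map
    (fun p => (PySem.List.slice p.2 none (some (max 0 (k - p.1 + 1)))).sum)).sum

-- ===== PRECONDITION & SPEC =====
def Spec_solution (board : List (List Int)) (k : Int) (out : Int) : Prop := out = solution_alt board k
instance (board : List (List Int)) (k : Int) (out : Int) : Decidable (Spec_solution board k out) := by unfold Spec_solution; infer_instance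

-- ===== CLAIM (what is proved, stated in full; the proofs are below) =====
def Claim_equal_solution : Prop := ∀ (board : List (List Int)) (k : Int), Dom_solution board k → Spec_solution board k (solution board k)

-- ===== LEMMAS AND PROOFS =====

-- an element of enumerate xs s is (s + index, the element at that index)
theorem enum_getD {α : Type} (d : α) : ∀ (xs : List α) (s : Int) (p : Int × α),
    p ∈ PySem.List.enumerate xs s → s ≤ p.1 ∧ PySem.List.pyGetD xs (p.1 - s) d = p.2 := by
  intro xs
  induction xs with
  | nil => intro s p hp; simp [PySem.List.enumerate_nil] at hp
  | cons x xs ih =>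
    intro s p hp
    rw [PySem.List.enumerate_cons] at hp
    rcases List.mem_cons.mp hp with h | h
    · subst h; simp [PySem.List.pyGetD]
    · obtain ⟨h1, h2⟩ := ih (s + 1) p h
      refine ⟨by omega, ?_⟩
      rw [PySem.List.pyGetD_of_nonneg _ _ (by omega)] at h2 ⊢
      have hj : (p.1 - s).toNat = (p.1 - (s + 1)).toNat + 1 := by omega
      rw [hj]
      simpa using h2

-- the cells of row r (enumerated from s) whose index satisfies i + j ≤ k form a prefix
theorem flatMap_enum_take (i k : Int) : ∀ (r : List Int) (s : Int),
    (PySem.List.enumerate r s).flatMap (fun p => if i + p.1 ≤ k then [p.2] else [])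
      = r.take (max 0 (k - i - s + 1)).toNat := by
  intro r
  induction r with
  | nil => intro s; simp [PySem.List.enumerate_nil]
  | cons x r ih =>
    intro s
    rw [PySem.List.enumerate_cons]
    simp only [List.flatMap_cons, ih (s + 1)]
    by_cases h : i + s ≤ k
    · have h1 : (max 0 (k - i - s + 1)).toNat = (max 0 (k - i - (s + 1) + 1)).toNat + 1 := by
        omega
      simp [h, h1]
    · have h1 : (max 0 (k - i - s + 1)).toNat = 0 := by omega
      have h2 : (max 0 (k - i - (s + 1) + 1)).toNat = 0 := by omega
      simp [h, h1, h2]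

-- A's inner loop appends exactly the prefix of the row
theorem inner_loop (r : List Int) (i k : Int) (lst : List Int) :
    (PySem.List.pyRange 0 (r.length : Int) 1).foldl
      (fun acc j => if i + j ≤ k then acc ++ [PySem.List.pyGetD r j 0] else acc) lst
      = lst ++ r.take (max 0 (k - i + 1)).toNat := by
  have h0 : (r.length : Int) = 0 + (r.length : Int) := by ring
  rw [h0, ← PySem.List.map_fst_enumerate r 0, List.foldl_map]
  rw [PySem.List.foldl_congr_mem _ _
      (fun acc p => acc ++ (if i + p.1 ≤ k then [p.2] else [])) lst ?_]
  · rw [PySem.List.foldl_append_eq_flatMap, flatMap_enum_take i k r 0]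
    norm_num
  · intro acc p hp
    obtain ⟨_, h2⟩ := enum_getD 0 r 0 p hp
    simp only [sub_zero] at h2
    split_ifs with h <;> simp [h2, h]

-- sum distributes over flatMap
theorem sum_flatMap_eq (g : (Int × List Int) → List Int) (l : List (Int × List Int)) :
    (l.flatMap g).sum = (l.map (fun x => (g x).sum)).sum := by
  induction l with
  | nil => simp
  | cons x xs ih => simp [ih]

theorem solution_eq_alt (board : List (List Int)) (k : Int) :
    solution board k = solution_alt board k := by
  unfold solution
  simp only [inner_loop]
  have h0 : (board.length : Int) = 0 + (board.length : Int) := by ring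
  rw [h0, ← PySem.List.map_fst_enumerate board 0, List.foldl_map]
  rw [PySem.List.foldl_congr_mem _ _
      (fun acc p => acc ++ p.2.take (max 0 (k - p.1 + 1)).toNat) [] ?_]
  · rw [PySem.List.foldl_append_eq_flatMap]
    rw [List.nil_append, sum_flatMap_eq]
    unfold solution_alt
    congr 1
    apply List.map_congr_left
    intro p _
    rw [PySem.List.slice_to _ (by omega)]
  · intro acc p hp
    obtain ⟨_, h2⟩ := enum_getD [] board 0 p hp
    simp only [sub_zero] at h2
    rw [h2]

-- ===== VERDICT (by name: the statement is the Claim_ definition above) =====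
theorem solution_spec : Claim_equal_solution := by
  intro board k _
  unfold Spec_solution
  exact solution_eq_alt board k
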